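-- pv_equiv track=rewrite | github.com/slyckmb/hashall | bin/qb-stoppeddl-find-identical-twins.py | alias_variants
-- ===== SOURCE A (Python) =====
-- from typing import Dict, List, Optional, Sequence, Set, Tuple
--
-- def canonical_alias(path: str) -> str:
--     p = str(path or "").strip().rstrip("/")
--     if not p:
--         return ""
--     if p == "/stash/media":
--         return "/data/media"
--     if p.startswith("/stash/media/"):
--         return "/data/media/" + p[len("/stash/media/") :]
--     if p == "/pool/data/seeds":
--         return "/data/media/torrents/seeding"
--     if p.startswith("/pool/data/seeds/"):
--         return "/data/media/torrents/seeding/" + p[len("/pool/data/seeds/") :]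
--     if p == "/pool/data/cross-seed-link":
--         return "/data/media/torrents/seeding/cross-seed-link"
--     if p.startswith("/pool/data/cross-seed-link/"):
--         return "/data/media/torrents/seeding/cross-seed-link/" + p[len("/pool/data/cross-seed-link/") :]
--     if p == "/stash/media/downloads/torrents/seeding":
--         return "/data/media/torrents/seeding"
--     if p.startswith("/stash/media/downloads/torrents/seeding/"):
--         return "/data/media/torrents/seeding/" + p[len("/stash/media/downloads/torrents/seeding/") :]
--     return p
--
-- def alias_variants(path: str) -> List[str]:
--     p = str(path or "").strip().rstrip("/")
--     if not p:
--         return []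
--     out = [p, canonical_alias(p)]
--     if p == "/data/media" or p.startswith("/data/media/"):
--         out.append("/stash/media" + p[len("/data/media") :])
--     if p == "/stash/media" or p.startswith("/stash/media/"):
--         out.append("/data/media" + p[len("/stash/media") :])
--     if p == "/data/media/torrents/seeding" or p.startswith("/data/media/torrents/seeding/"):
--         out.append("/pool/data/seeds" + p[len("/data/media/torrents/seeding") :])
--         out.append("/stash/media/downloads/torrents/seeding" + p[len("/data/media/torrents/seeding") :])
--     if p == "/pool/data/seeds" or p.startswith("/pool/data/seeds/"):
--         out.append("/data/media/torrents/seeding" + p[len("/pool/data/seeds") :])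
--     if p == "/data/media/torrents/seeding/cross-seed-link" or p.startswith("/data/media/torrents/seeding/cross-seed-link/"):
--         out.append("/pool/data/cross-seed-link" + p[len("/data/media/torrents/seeding/cross-seed-link") :])
--     if p == "/pool/data/cross-seed-link" or p.startswith("/pool/data/cross-seed-link/"):
--         out.append("/data/media/torrents/seeding/cross-seed-link" + p[len("/pool/data/cross-seed-link") :])
--     seen: Set[str] = set()
--     dedup: List[str] = []
--     for cand in out:
--         c = str(cand).rstrip("/")
--         if c and c not in seen:
--             seen.add(c)
--             dedup.append(c)
--     return dedup
-- ===== SOURCE B (Python) =====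
-- from typing import List
--
-- # B works on path COMPONENTS: it tokenizes the normalized path once with split("/"),
-- # matches rules as segment-list prefixes, and rebuilds candidates with "/".join.
--
-- _CANON_SEG_RULES = [
--     (["", "stash", "media"], ["", "data", "media"]),
--     (["", "pool", "data", "seeds"], ["", "data", "media", "torrents", "seeding"]),
--     (["", "pool", "data", "cross-seed-link"],
--      ["", "data", "media", "torrents", "seeding", "cross-seed-link"]),
--     (["", "stash", "media", "downloads", "torrents", "seeding"],
--      ["", "data", "media", "torrents", "seeding"]),
-- ]
--
-- _ALIAS_SEG_RULES = [
--     (["", "data", "media"], ["", "stash", "media"]),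
--     (["", "stash", "media"], ["", "data", "media"]),
--     (["", "data", "media", "torrents", "seeding"], ["", "pool", "data", "seeds"]),
--     (["", "data", "media", "torrents", "seeding"],
--      ["", "stash", "media", "downloads", "torrents", "seeding"]),
--     (["", "pool", "data", "seeds"], ["", "data", "media", "torrents", "seeding"]),
--     (["", "data", "media", "torrents", "seeding", "cross-seed-link"],
--      ["", "pool", "data", "cross-seed-link"]),
--     (["", "pool", "data", "cross-seed-link"],
--      ["", "data", "media", "torrents", "seeding", "cross-seed-link"]),
-- ]
--
-- def canonical_alias(path: str) -> str:
--     p = str(path or "").strip().rstrip("/")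
--     if not p:
--         return ""
--     segs = p.split("/")
--     for src, dst in _CANON_SEG_RULES:
--         if segs[:len(src)] == src:
--             return "/".join(dst + segs[len(src):])
--     return p
--
-- def alias_variants(path: str) -> List[str]:
--     p = str(path or "").strip().rstrip("/")
--     if not p:
--         return []
--     segs = p.split("/")
--     out = [p, canonical_alias(p)]
--     for src, dst in _ALIAS_SEG_RULES:
--         if segs[:len(src)] == src:
--             out.append("/".join(dst + segs[len(src):]))
--     dedup: List[str] = []
--     for cand in out:
--         c = cand.rstrip("/")
--         if c and c not in dedup:
--             dedup.append(c)
--     return dedup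
-- ===== Notes on version B (the rewrite author's own statement) =====
-- stated objective: alternative
-- what changed: B re-represents paths as lists of slash-separated components: it tokenizes the normalized path once, matches every rewrite rule as a segment-list prefix, and rebuilds each candidate by joining components, instead of A's per-rule string startswith tests and len()-offset string surgery; the dedup tests membership in the output list itself instead of a side set.
import Mathlib
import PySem

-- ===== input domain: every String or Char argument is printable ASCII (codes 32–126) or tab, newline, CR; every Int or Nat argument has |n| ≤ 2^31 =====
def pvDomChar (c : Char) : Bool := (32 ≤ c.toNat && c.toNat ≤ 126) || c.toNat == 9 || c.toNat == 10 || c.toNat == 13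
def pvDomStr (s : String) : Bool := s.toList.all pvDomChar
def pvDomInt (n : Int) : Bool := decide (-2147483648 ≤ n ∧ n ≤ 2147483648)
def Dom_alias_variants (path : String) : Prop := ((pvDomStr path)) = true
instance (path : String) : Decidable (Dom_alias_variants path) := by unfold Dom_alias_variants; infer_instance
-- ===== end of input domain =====

-- B re-represents paths as lists of slash-separated COMPONENTS: it tokenizes the normalized
-- path once, matches rewrite rules as segment-list prefixes, and rebuilds each candidate by
-- joining components (objective: alternative; same return value).

-- hand port of Python's s.rstrip("/") (PySem has no rstrip-with-chars): drop trailing '/' chars; exact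
def pvRstripSlash (s : String) : String :=
  String.ofList ((s.toList.reverse.dropWhile (fun c => c == '/')).reverse)

-- ===== PORT A =====
def canonicalAliasA (path : String) : String :=
  let p := pvRstripSlash (PySem.Str.strip path)
  if p == "" then ""
  else if p == "/stash/media" then "/data/media"
  else if PySem.Str.startswith p "/stash/media/" then
    "/data/media/" ++ PySem.Str.slice p (some (PySem.Str.len "/stash/media/")) none
  else if p == "/pool/data/seeds" then "/data/media/torrents/seeding"
  else if PySem.Str.startswith p "/pool/data/seeds/" then
    "/data/media/torrents/seeding/" ++ PySem.Str.slice p (some (PySem.Str.len "/pool/data/seeds/")) none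
  else if p == "/pool/data/cross-seed-link" then "/data/media/torrents/seeding/cross-seed-link"
  else if PySem.Str.startswith p "/pool/data/cross-seed-link/" then
    "/data/media/torrents/seeding/cross-seed-link/" ++ PySem.Str.slice p (some (PySem.Str.len "/pool/data/cross-seed-link/")) none
  else if p == "/stash/media/downloads/torrents/seeding" then "/data/media/torrents/seeding"
  else if PySem.Str.startswith p "/stash/media/downloads/torrents/seeding/" then
    "/data/media/torrents/seeding/" ++ PySem.Str.slice p (some (PySem.Str.len "/stash/media/downloads/torrents/seeding/")) none
  else p

-- the seen-set + output-list dedup loop at the end of A's alias_variants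
def dedupPassA (out : List String) : List String :=
  (out.foldl (fun (st : PySem.Set String × List String) cand =>
      let c := pvRstripSlash cand
      if c != "" && !(st.1.contains c) then (st.1.add c, st.2 ++ [c]) else st)
    (([] : PySem.Set String), ([] : List String))).2

def alias_variants (path : String) : List String :=
  let p := pvRstripSlash (PySem.Str.strip path)
  if p == "" then []
  else
    let out0 := [p, canonicalAliasA p]
    let out1 := if p == "/data/media" || PySem.Str.startswith p "/data/media/" then
        out0 ++ ["/stash/media" ++ PySem.Str.slice p (some (PySem.Str.len "/data/media")) none] else out0
    let out2 := if p == "/stash/media" || PySem.Str.startswith p "/stash/media/" then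
        out1 ++ ["/data/media" ++ PySem.Str.slice p (some (PySem.Str.len "/stash/media")) none] else out1
    let out3 := if p == "/data/media/torrents/seeding" || PySem.Str.startswith p "/data/media/torrents/seeding/" then
        out2 ++ ["/pool/data/seeds" ++ PySem.Str.slice p (some (PySem.Str.len "/data/media/torrents/seeding")) none,
                 "/stash/media/downloads/torrents/seeding" ++ PySem.Str.slice p (some (PySem.Str.len "/data/media/torrents/seeding")) none] else out2
    let out4 := if p == "/pool/data/seeds" || PySem.Str.startswith p "/pool/data/seeds/" then
        out3 ++ ["/data/media/torrents/seeding" ++ PySem.Str.slice p (some (PySem.Str.len "/pool/data/seeds")) none] else out3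
    let out5 := if p == "/data/media/torrents/seeding/cross-seed-link" || PySem.Str.startswith p "/data/media/torrents/seeding/cross-seed-link/" then
        out4 ++ ["/pool/data/cross-seed-link" ++ PySem.Str.slice p (some (PySem.Str.len "/data/media/torrents/seeding/cross-seed-link")) none] else out4
    let out6 := if p == "/pool/data/cross-seed-link" || PySem.Str.startswith p "/pool/data/cross-seed-link/" then
        out5 ++ ["/data/media/torrents/seeding/cross-seed-link" ++ PySem.Str.slice p (some (PySem.Str.len "/pool/data/cross-seed-link")) none] else out5
    dedupPassA out6

-- ===== PORT B =====
-- a path component, as its character list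
def sc (s : String) : List Char := s.toList

-- port of p.split("/") — exact for a one-character separator (empty pieces kept, "" ↦ [""])
def pvSegs (s : String) : List (List Char) := s.toList.splitOn '/'

-- port of "/".join(segments)
def pvJoin (l : List (List Char)) : String := String.ofList (PySem.Chars.join ['/'] l)

def segCanonRules : List (List (List Char) × List (List Char)) :=
  [([[], sc "stash", sc "media"], [[], sc "data", sc "media"]),
   ([[], sc "pool", sc "data", sc "seeds"], [[], sc "data", sc "media", sc "torrents", sc "seeding"]),
   ([[], sc "pool", sc "data", sc "cross-seed-link"],
    [[], sc "data", sc "media", sc "torrents", sc "seeding", sc "cross-seed-link"]),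
   ([[], sc "stash", sc "media", sc "downloads", sc "torrents", sc "seeding"],
    [[], sc "data", sc "media", sc "torrents", sc "seeding"])]

def segAliasRules : List (List (List Char) × List (List Char)) :=
  [([[], sc "data", sc "media"], [[], sc "stash", sc "media"]),
   ([[], sc "stash", sc "media"], [[], sc "data", sc "media"]),
   ([[], sc "data", sc "media", sc "torrents", sc "seeding"], [[], sc "pool", sc "data", sc "seeds"]),
   ([[], sc "data", sc "media", sc "torrents", sc "seeding"],
    [[], sc "stash", sc "media", sc "downloads", sc "torrents", sc "seeding"]),
   ([[], sc "pool", sc "data", sc "seeds"], [[], sc "data", sc "media", sc "torrents", sc "seeding"]),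
   ([[], sc "data", sc "media", sc "torrents", sc "seeding", sc "cross-seed-link"],
    [[], sc "pool", sc "data", sc "cross-seed-link"]),
   ([[], sc "pool", sc "data", sc "cross-seed-link"],
    [[], sc "data", sc "media", sc "torrents", sc "seeding", sc "cross-seed-link"])]

-- B's canonical_alias rule scan: first rule whose source segments are a prefix wins
def canonSegFind (p : String) (segs : List (List Char)) : List (List (List Char) × List (List Char)) → String
  | [] => p
  | r :: rest =>
    if PySem.List.slice segs none (some (r.1.length : Int)) == r.1 then
      pvJoin (r.2 ++ PySem.List.slice segs (some (r.1.length : Int)) none)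
    else canonSegFind p segs rest

def canonicalAliasB (path : String) : String :=
  let p := pvRstripSlash (PySem.Str.strip path)
  if p == "" then "" else canonSegFind p (pvSegs p) segCanonRules

-- B's dedup loop: membership is tested on the output list itself
def dedupPassB (out : List String) : List String :=
  out.foldl (fun dedup cand =>
      let c := pvRstripSlash cand
      if c != "" && !(dedup.contains c) then dedup ++ [c] else dedup) []

def alias_variants_alt (path : String) : List String :=
  let p := pvRstripSlash (PySem.Str.strip path)
  if p == "" then []
  else
    let segs := pvSegs p
    let out := segAliasRules.foldl (fun acc r =>
      if PySem.List.slice segs none (some (r.1.length : Int)) == r.1 then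
        acc ++ [pvJoin (r.2 ++ PySem.List.slice segs (some (r.1.length : Int)) none)]
      else acc) [p, canonicalAliasB p]
    dedupPassB out

-- ===== PRECONDITION & SPEC =====
def Spec_alias_variants (path : String) (out : List String) : Prop := out = alias_variants_alt path
instance (path : String) (out : List String) : Decidable (Spec_alias_variants path out) := by unfold Spec_alias_variants; infer_instance

-- ===== CLAIM (what is proved, stated in full; the proofs are below) =====
def Claim_equal_alias_variants : Prop := ∀ (path : String), Dom_alias_variants path → Spec_alias_variants path (alias_variants path)

-- ===== LEMMAS AND PROOFS =====

-- literal string appends, oriented for simp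
theorem plit1 : ("/data/media" ++ "/" : String) = "/data/media/" := rfl
theorem plit2 : ("/stash/media" ++ "/" : String) = "/stash/media/" := rfl
theorem plit3 : ("/pool/data/seeds" ++ "/" : String) = "/pool/data/seeds/" := rfl
theorem plit4 : ("/pool/data/cross-seed-link" ++ "/" : String) = "/pool/data/cross-seed-link/" := rfl
theorem plit5 : ("/data/media/torrents/seeding" ++ "/" : String) = "/data/media/torrents/seeding/" := rfl
theorem plit6 : ("/data/media/torrents/seeding/cross-seed-link" ++ "/" : String) = "/data/media/torrents/seeding/cross-seed-link/" := rfl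
theorem plit7 : ("/stash/media/downloads/torrents/seeding" ++ "/" : String) = "/stash/media/downloads/torrents/seeding/" := rfl

theorem pvSlashToList : ("/" : String).toList = ['/'] := rfl

-- if q starts with pre ++ "/", rewriting with the slash inside the prefix or after the target agrees
theorem pvStep (q pre new : String)
    (h : PySem.Str.startswith q (pre ++ "/") = true) :
    (new ++ "/") ++ PySem.Str.slice q (some (PySem.Str.len (pre ++ "/"))) none
      = new ++ PySem.Str.slice q (some (PySem.Str.len pre)) none := by
  rw [PySem.Str.startswith_eq, PySem.Chars.startswith_iff] at h
  obtain ⟨r, hr⟩ := h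
  have h2 : q.toList = (pre.toList ++ ['/']) ++ r := by
    rw [← hr]; simp [String.toList_append, pvSlashToList]
  rw [← String.toList_inj]
  simp only [String.toList_append, PySem.Str.toList_slice, PySem.Chars.slice_eq_listSlice,
    PySem.Str.len_eq, pvSlashToList, List.length_append, List.length_cons, List.length_nil]
  rw [PySem.List.slice_from_natCast, PySem.List.slice_from_natCast, h2]
  have d2 : ((pre.toList ++ ['/']) ++ r).drop pre.toList.length = '/' :: r := by
    rw [List.append_assoc]
    have hdl := List.drop_left (l₁ := pre.toList) (l₂ := '/' :: r)
    simp only [String.length_toList] at hdl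
    exact hdl
  have d1 : List.drop (pre.length + 1) (pre.toList ++ '/' :: r) = r := by
    rw [show pre.toList ++ '/' :: r = (pre.toList ++ ['/']) ++ r by simp]
    rw [List.drop_left' (by simp)]
  simp [d1]

-- ---- split/join machinery for the segment representation ----

theorem splitOn_slash_ne_nil (xs : List Char) : xs.splitOn '/' ≠ [] := by
  simp only [List.splitOn]; exact List.splitOnP_ne_nil _ xs

theorem splitOn_append_slash (xs ys : List Char) :
    (xs ++ '/' :: ys).splitOn '/' = xs.splitOn '/' ++ ys.splitOn '/' := by
  simp only [List.splitOn]
  exact List.splitOnP_append_cons _ xs ys '/' rfl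

theorem intercalate_single (x : Char) (h : List Char) :
    List.intercalate [x] [h] = h := by
  simp [List.intercalate]

theorem intercalate_append_cons (x : Char) (A : List (List Char)) (r0 : List Char)
    (R : List (List Char)) (hA : A ≠ []) :
    List.intercalate [x] (A ++ r0 :: R)
      = List.intercalate [x] A ++ x :: List.intercalate [x] (r0 :: R) := by
  induction A with
  | nil => exact absurd rfl hA
  | cons h t ih =>
    cases t with
    | nil =>
      have j1 : List.intercalate [x] (h :: r0 :: R)
          = h ++ [x] ++ List.intercalate [x] (r0 :: R) :=
        PySem.Chars.join_cons_cons [x] h r0 R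
      simp only [List.nil_append, List.cons_append, j1, intercalate_single]
      simp
    | cons h2 t =>
      have j1 : List.intercalate [x] (h :: h2 :: (t ++ r0 :: R))
          = h ++ [x] ++ List.intercalate [x] (h2 :: (t ++ r0 :: R)) :=
        PySem.Chars.join_cons_cons [x] h h2 _
      have j2 : List.intercalate [x] (h :: h2 :: t)
          = h ++ [x] ++ List.intercalate [x] (h2 :: t) :=
        PySem.Chars.join_cons_cons [x] h h2 t
      have ih' := ih (by simp)
      simp only [List.cons_append] at ih' ⊢
      rw [j1, ih', j2]
      simp

-- if the first |split a| segments of q are exactly split a, then q is a, or a plus '/' plus the joined rest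
theorem segs_decomp (a q : List Char)
    (h : (q.splitOn '/').take (a.splitOn '/').length = a.splitOn '/') :
    ((q.splitOn '/').drop (a.splitOn '/').length = [] ∧ q = a) ∨
    (∃ r0 R, (q.splitOn '/').drop (a.splitOn '/').length = r0 :: R ∧
       q = a ++ '/' :: List.intercalate ['/'] (r0 :: R)) := by
  have hS : q.splitOn '/' = a.splitOn '/' ++ (q.splitOn '/').drop (a.splitOn '/').length := by
    conv_lhs => rw [← List.take_append_drop (a.splitOn '/').length (q.splitOn '/')]
    rw [h]
  cases hR : (q.splitOn '/').drop (a.splitOn '/').length with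
  | nil =>
    left
    refine ⟨rfl, ?_⟩
    rw [hR, List.append_nil] at hS
    have h1 := List.intercalate_splitOn q '/'
    rw [hS, List.intercalate_splitOn a '/'] at h1
    exact h1.symm
  | cons r0 R =>
    right
    refine ⟨r0, R, rfl, ?_⟩
    rw [hR] at hS
    have h1 := List.intercalate_splitOn q '/'
    rw [hS, intercalate_append_cons '/' _ r0 R (splitOn_slash_ne_nil a),
      List.intercalate_splitOn a '/'] at h1
    exact h1.symm

theorem segs_take_eq_iff (a q : List Char) :
    (q.splitOn '/').take (a.splitOn '/').length = a.splitOn '/' ↔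
      (q = a ∨ (a ++ ['/']) <+: q) := by
  constructor
  · intro h
    rcases segs_decomp a q h with ⟨-, hq⟩ | ⟨r0, R, -, hq⟩
    · exact Or.inl hq
    · exact Or.inr ⟨List.intercalate ['/'] (r0 :: R), by rw [hq]; simp⟩
  · rintro (rfl | ⟨r, hr⟩)
    · exact List.take_length
    · have hq : q = a ++ '/' :: r := by rw [← hr]; simp
      subst hq
      rw [splitOn_append_slash]
      exact List.take_left

theorem segs_join_drop (a d q : List Char)
    (h : (q.splitOn '/').take (a.splitOn '/').length = a.splitOn '/') :
    List.intercalate ['/'] (d.splitOn '/' ++ (q.splitOn '/').drop (a.splitOn '/').length)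
      = d ++ q.drop a.length := by
  rcases segs_decomp a q h with ⟨hR, hq⟩ | ⟨r0, R, hR, hq⟩
  · subst hq
    rw [hR, List.append_nil, List.intercalate_splitOn d '/', List.drop_length, List.append_nil]
  · rw [hR, hq, intercalate_append_cons '/' _ r0 R (splitOn_slash_ne_nil d),
      List.intercalate_splitOn d '/']
    congr 1
    exact (List.drop_left (l₁ := a) (l₂ := '/' :: List.intercalate ['/'] (r0 :: R))).symm

-- B's segment-prefix test equals A's string test (String level)
theorem segMatch (a : String) (A : List (List Char)) (n : Nat)
    (hA : a.toList.splitOn '/' = A) (hn : n = A.length) (q : String) :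
    (PySem.List.slice (pvSegs q) none (some (n : Int)) == A)
      = ((q == a) || PySem.Str.startswith q (a ++ "/")) := by
  subst hA hn
  rw [Bool.eq_iff_iff]
  rw [pvSegs, PySem.List.slice_to _ (Int.natCast_nonneg _)]
  simp only [Int.toNat_natCast, beq_iff_eq, Bool.or_eq_true, PySem.Str.startswith_eq,
    PySem.Chars.startswith_iff, String.toList_append, pvSlashToList]
  rw [← String.toList_inj]
  exact segs_take_eq_iff a.toList q.toList

-- B's rebuilt candidate equals A's string-surgery candidate (String level)
theorem segBranch (a d : String) (A D : List (List Char)) (n : Nat)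
    (hA : a.toList.splitOn '/' = A) (hD : d.toList.splitOn '/' = D) (hn : n = A.length)
    (q : String)
    (h : (PySem.List.slice (pvSegs q) none (some (n : Int)) == A) = true) :
    pvJoin (D ++ PySem.List.slice (pvSegs q) (some (n : Int)) none)
      = d ++ PySem.Str.slice q (some (PySem.Str.len a)) none := by
  subst hA hD hn
  rw [pvSegs, PySem.List.slice_to _ (Int.natCast_nonneg _), Int.toNat_natCast, beq_iff_eq] at h
  rw [← String.toList_inj]
  simp only [pvJoin, pvSegs, String.toList_ofList, String.toList_append, PySem.Str.toList_slice,
    PySem.Chars.slice_eq_listSlice, PySem.Str.len_eq, PySem.List.slice_from_natCast]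
  have := segs_join_drop a.toList d.toList q.toList h
  simpa [PySem.Chars.join, String.length_toList] using this

-- congruence steps for the candidate-building chains
theorem stepEq (c : Bool) (accA accB : List String) (x y : String)
    (hacc : accA = accB) (hxy : c = true → x = y) :
    (if c then accA ++ [x] else accA) = (if c then accB ++ [y] else accB) := by
  cases c
  · simpa using hacc
  · simp [hacc, hxy rfl]

theorem stepEq2 (c : Bool) (accA accB : List String) (x1 x2 y1 y2 : String)
    (hacc : accA = accB) (h1 : c = true → x1 = y1) (h2 : c = true → x2 = y2) :
    (if c then accA ++ [x1, x2] else accA) = (if c then accB ++ [y1, y2] else accB) := by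
  cases c
  · simpa using hacc
  · simp [hacc, h1 rfl, h2 rfl]

theorem ifPairMerge (c : Bool) (acc : List String) (x y : String) :
    (if c then (if c then acc ++ [x] else acc) ++ [y] else (if c then acc ++ [x] else acc))
      = (if c then acc ++ [x, y] else acc) := by
  cases c <;> simp

theorem canon_chain_eq (q : String) :
    (if q == "" then ""
     else if q == "/stash/media" then "/data/media"
     else if PySem.Str.startswith q "/stash/media/" then
       "/data/media/" ++ PySem.Str.slice q (some (PySem.Str.len "/stash/media/")) none
     else if q == "/pool/data/seeds" then "/data/media/torrents/seeding"
     else if PySem.Str.startswith q "/pool/data/seeds/" then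
       "/data/media/torrents/seeding/" ++ PySem.Str.slice q (some (PySem.Str.len "/pool/data/seeds/")) none
     else if q == "/pool/data/cross-seed-link" then "/data/media/torrents/seeding/cross-seed-link"
     else if PySem.Str.startswith q "/pool/data/cross-seed-link/" then
       "/data/media/torrents/seeding/cross-seed-link/" ++ PySem.Str.slice q (some (PySem.Str.len "/pool/data/cross-seed-link/")) none
     else if q == "/stash/media/downloads/torrents/seeding" then "/data/media/torrents/seeding"
     else if PySem.Str.startswith q "/stash/media/downloads/torrents/seeding/" then
       "/data/media/torrents/seeding/" ++ PySem.Str.slice q (some (PySem.Str.len "/stash/media/downloads/torrents/seeding/")) none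
     else q)
      = (if q == "" then "" else canonSegFind q (pvSegs q) segCanonRules) := by
  by_cases h0 : q == ""
  · simp [h0]
  · have h0' : (q == "") = false := by simpa using h0
    have m1 := segMatch "/stash/media" [[], sc "stash", sc "media"] _ (by decide) rfl q
    have m2 := segMatch "/pool/data/seeds" [[], sc "pool", sc "data", sc "seeds"] _ (by decide) rfl q
    have m3 := segMatch "/pool/data/cross-seed-link" [[], sc "pool", sc "data", sc "cross-seed-link"] _ (by decide) rfl q
    have m4 := segMatch "/stash/media/downloads/torrents/seeding" [[], sc "stash", sc "media", sc "downloads", sc "torrents", sc "seeding"] _ (by decide) rfl q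
    simp only [h0', Bool.false_eq_true, if_false, segCanonRules, canonSegFind,
      m1, m2, m3, m4, plit2, plit3, plit4, plit7]
    by_cases e1 : q = "/stash/media"
    · subst e1; decide
    have e1' : (q == "/stash/media") = false := by simp [e1]
    by_cases s1 : PySem.Str.startswith q "/stash/media/" = true
    · simp only [e1', s1, Bool.false_eq_true, Bool.or_true, if_false, if_true]
      rw [← plit1, ← plit2, pvStep q "/stash/media" "/data/media" (by rw [plit2]; exact s1)]
      exact (segBranch "/stash/media" "/data/media" [[], sc "stash", sc "media"]
        [[], sc "data", sc "media"] _ (by decide) (by decide) rfl q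
        (by rw [m1, plit2, s1]; simp)).symm
    have s1' : PySem.Str.startswith q "/stash/media/" = false := by simpa using s1
    by_cases e2 : q = "/pool/data/seeds"
    · subst e2; decide
    have e2' : (q == "/pool/data/seeds") = false := by simp [e2]
    by_cases s2 : PySem.Str.startswith q "/pool/data/seeds/" = true
    · simp only [e1', e2', s1', s2, Bool.false_eq_true, Bool.or_true, Bool.or_false, if_false, if_true]
      rw [← plit5, ← plit3, pvStep q "/pool/data/seeds" "/data/media/torrents/seeding" (by rw [plit3]; exact s2)]
      exact (segBranch "/pool/data/seeds" "/data/media/torrents/seeding"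
        [[], sc "pool", sc "data", sc "seeds"]
        [[], sc "data", sc "media", sc "torrents", sc "seeding"] _ (by decide) (by decide) rfl q
        (by rw [m2, plit3, s2]; simp)).symm
    have s2' : PySem.Str.startswith q "/pool/data/seeds/" = false := by simpa using s2
    by_cases e3 : q = "/pool/data/cross-seed-link"
    · subst e3; decide
    have e3' : (q == "/pool/data/cross-seed-link") = false := by simp [e3]
    by_cases s3 : PySem.Str.startswith q "/pool/data/cross-seed-link/" = true
    · simp only [e1', e2', e3', s1', s2', s3, Bool.false_eq_true, Bool.or_true, Bool.or_false, if_false, if_true]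
      rw [← plit6, ← plit4, pvStep q "/pool/data/cross-seed-link" "/data/media/torrents/seeding/cross-seed-link" (by rw [plit4]; exact s3)]
      exact (segBranch "/pool/data/cross-seed-link" "/data/media/torrents/seeding/cross-seed-link"
        [[], sc "pool", sc "data", sc "cross-seed-link"]
        [[], sc "data", sc "media", sc "torrents", sc "seeding", sc "cross-seed-link"] _
        (by decide) (by decide) rfl q (by rw [m3, plit4, s3]; simp)).symm
    have s3' : PySem.Str.startswith q "/pool/data/cross-seed-link/" = false := by simpa using s3
    by_cases e4 : q = "/stash/media/downloads/torrents/seeding"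
    · subst e4; decide
    have e4' : (q == "/stash/media/downloads/torrents/seeding") = false := by simp [e4]
    by_cases s4 : PySem.Str.startswith q "/stash/media/downloads/torrents/seeding/" = true
    · simp only [e1', e2', e3', e4', s1', s2', s3', s4, Bool.false_eq_true, Bool.or_true, Bool.or_false, if_false, if_true]
      rw [← plit5, ← plit7, pvStep q "/stash/media/downloads/torrents/seeding" "/data/media/torrents/seeding" (by rw [plit7]; exact s4)]
      exact (segBranch "/stash/media/downloads/torrents/seeding" "/data/media/torrents/seeding"
        [[], sc "stash", sc "media", sc "downloads", sc "torrents", sc "seeding"]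
        [[], sc "data", sc "media", sc "torrents", sc "seeding"] _
        (by decide) (by decide) rfl q (by rw [m4, plit7, s4]; simp)).symm
    have s4' : PySem.Str.startswith q "/stash/media/downloads/torrents/seeding/" = false := by simpa using s4
    simp only [e1', e2', e3', e4', s1', s2', s3', s4', Bool.false_eq_true, Bool.or_false, if_false]

theorem canon_eq (s : String) : canonicalAliasA s = canonicalAliasB s := by
  unfold canonicalAliasA canonicalAliasB
  exact canon_chain_eq _

theorem pvSetContains_eq {α : Type} [BEq α] (s : PySem.Set α) (x : α) :
    PySem.Set.contains s x = List.contains s x := rfl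

theorem dedup_agree (l : List String) : ∀ (seen d : List String),
    (∀ x : String, List.contains seen x = List.contains d x) →
    (l.foldl (fun (st : PySem.Set String × List String) cand =>
        let c := pvRstripSlash cand
        if c != "" && !(st.1.contains c) then (st.1.add c, st.2 ++ [c]) else st) (seen, d)).2
      = l.foldl (fun dedup cand =>
          let c := pvRstripSlash cand
          if c != "" && !(dedup.contains c) then dedup ++ [c] else dedup) d := by
  induction l with
  | nil => intro seen d h; rfl
  | cons hd tl ih =>
    intro seen d h
    simp only [List.foldl_cons, pvSetContains_eq, h]
    by_cases hc : (pvRstripSlash hd != "" && !(List.contains d (pvRstripSlash hd))) = true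
    · have hdc : List.contains d (pvRstripSlash hd) = false := by
        have := (Bool.and_eq_true _ _).mp hc
        simpa using this.2
      have hsc : List.contains seen (pvRstripSlash hd) = false := by rw [h]; exact hdc
      simp only [hc, if_true]
      refine ih _ _ (fun x => ?_)
      have hsc' : pvRstripSlash hd ∉ seen := by simpa using hsc
      have hadd : PySem.Set.add seen (pvRstripSlash hd) = seen ++ [pvRstripSlash hd] := by
        simp [PySem.Set.add, hsc']
      rw [hadd]
      have hx : decide (x ∈ seen) = decide (x ∈ d) := by simpa using h x
      simp [hx]
    · simp only [Bool.not_eq_true] at hc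
      simp only [hc, Bool.false_eq_true, if_false]
      exact ih _ _ h

theorem dedup_eq (l : List String) : dedupPassA l = dedupPassB l := by
  unfold dedupPassA dedupPassB
  exact dedup_agree l [] [] (fun _ => rfl)

-- ===== VERDICT (by name: the statement is the Claim_ definition above) =====
set_option maxHeartbeats 1000000 in
theorem alias_variants_spec : Claim_equal_alias_variants := by
  intro path _
  unfold Spec_alias_variants alias_variants alias_variants_alt
  set p := pvRstripSlash (PySem.Str.strip path) with hp
  by_cases h0 : p == ""
  · simp [h0]
  · simp only [h0, Bool.false_eq_true, if_false]
    rw [dedup_eq]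
    refine congrArg dedupPassB ?_
    have m1 := segMatch "/data/media" [[], sc "data", sc "media"] _ (by decide) rfl p
    have m2 := segMatch "/stash/media" [[], sc "stash", sc "media"] _ (by decide) rfl p
    have m3 := segMatch "/data/media/torrents/seeding" [[], sc "data", sc "media", sc "torrents", sc "seeding"] _ (by decide) rfl p
    have m4 := segMatch "/pool/data/seeds" [[], sc "pool", sc "data", sc "seeds"] _ (by decide) rfl p
    have m5 := segMatch "/data/media/torrents/seeding/cross-seed-link" [[], sc "data", sc "media", sc "torrents", sc "seeding", sc "cross-seed-link"] _ (by decide) rfl p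
    have m6 := segMatch "/pool/data/cross-seed-link" [[], sc "pool", sc "data", sc "cross-seed-link"] _ (by decide) rfl p
    simp only [segAliasRules, List.foldl_cons, List.foldl_nil,
      m1, m2, m3, m4, m5, m6, plit1, plit2, plit3, plit4, plit5, plit6]
    rw [ifPairMerge]
    refine stepEq _ _ _ _ _ ?_ (fun hc => (segBranch "/pool/data/cross-seed-link"
      "/data/media/torrents/seeding/cross-seed-link"
      [[], sc "pool", sc "data", sc "cross-seed-link"]
      [[], sc "data", sc "media", sc "torrents", sc "seeding", sc "cross-seed-link"] _
      (by decide) (by decide) rfl p (by rw [m6, plit4]; exact hc)).symm)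
    refine stepEq _ _ _ _ _ ?_ (fun hc => (segBranch "/data/media/torrents/seeding/cross-seed-link"
      "/pool/data/cross-seed-link"
      [[], sc "data", sc "media", sc "torrents", sc "seeding", sc "cross-seed-link"]
      [[], sc "pool", sc "data", sc "cross-seed-link"] _
      (by decide) (by decide) rfl p (by rw [m5, plit6]; exact hc)).symm)
    refine stepEq _ _ _ _ _ ?_ (fun hc => (segBranch "/pool/data/seeds"
      "/data/media/torrents/seeding"
      [[], sc "pool", sc "data", sc "seeds"]
      [[], sc "data", sc "media", sc "torrents", sc "seeding"] _
      (by decide) (by decide) rfl p (by rw [m4, plit3]; exact hc)).symm)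
    refine stepEq2 _ _ _ _ _ _ _ ?_
      (fun hc => (segBranch "/data/media/torrents/seeding" "/pool/data/seeds"
        [[], sc "data", sc "media", sc "torrents", sc "seeding"]
        [[], sc "pool", sc "data", sc "seeds"] _
        (by decide) (by decide) rfl p (by rw [m3, plit5]; exact hc)).symm)
      (fun hc => (segBranch "/data/media/torrents/seeding" "/stash/media/downloads/torrents/seeding"
        [[], sc "data", sc "media", sc "torrents", sc "seeding"]
        [[], sc "stash", sc "media", sc "downloads", sc "torrents", sc "seeding"] _
        (by decide) (by decide) rfl p (by rw [m3, plit5]; exact hc)).symm)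
    refine stepEq _ _ _ _ _ ?_ (fun hc => (segBranch "/stash/media" "/data/media"
      [[], sc "stash", sc "media"] [[], sc "data", sc "media"] _
      (by decide) (by decide) rfl p (by rw [m2, plit2]; exact hc)).symm)
    refine stepEq _ _ _ _ _ ?_ (fun hc => (segBranch "/data/media" "/stash/media"
      [[], sc "data", sc "media"] [[], sc "stash", sc "media"] _
      (by decide) (by decide) rfl p (by rw [m1, plit1]; exact hc)).symm)
    rw [canon_eq]
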